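-- pv_equiv track=rewrite | github.com/kawacukennedy/chess_wizard | tools/generate_magic.py | get_bishop_mask
-- ===== SOURCE A (Python) =====
-- def get_bishop_mask(sq):
--     mask = 0
--     r, f = sq // 8, sq % 8
--     for i in range(1, min(7-r, 7-f)): mask |= 1 << ((r+i)*8 + f+i)
--     for i in range(1, min(7-r, f)): mask |= 1 << ((r+i)*8 + f-i)
--     for i in range(1, min(r, 7-f)): mask |= 1 << ((r-i)*8 + f+i)
--     for i in range(1, min(r, f)): mask |= 1 << ((r-i)*8 + f-i)
--     return mask
-- ===== SOURCE B (Python) =====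
-- def get_bishop_mask(sq):
--     # closed form: each diagonal ray's bits are a geometric series, no per-square loop
--     r, f = divmod(sq, 8)
--     p = 8 * r + f
--
--     def ray(n, step):
--         # bits p+step, p+2*step, ..., p+n*step as one pattern: repeating-bit factor << lowest exponent
--         if n <= 0:
--             return 0
--         s = abs(step)
--         low = p + (step if step > 0 else step * n)
--         return ((1 << (s * n)) - 1) // ((1 << s) - 1) << low
--
--     return (ray(min(7 - r, 7 - f) - 1, 9) | ray(min(7 - r, f) - 1, 7)
--           | ray(min(r, 7 - f) - 1, -7) | ray(min(r, f) - 1, -9))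
-- ===== Notes on version B (the rewrite author's own statement) =====
-- stated objective: alternative
-- what changed: Replaces A's four per-square diagonal loops by a loop-free closed form: each ray's bit pattern is the geometric series ((1<<(s*n))-1)//((1<<s)-1) shifted to the ray's lowest exponent, so no square is visited individually.
import Mathlib
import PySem

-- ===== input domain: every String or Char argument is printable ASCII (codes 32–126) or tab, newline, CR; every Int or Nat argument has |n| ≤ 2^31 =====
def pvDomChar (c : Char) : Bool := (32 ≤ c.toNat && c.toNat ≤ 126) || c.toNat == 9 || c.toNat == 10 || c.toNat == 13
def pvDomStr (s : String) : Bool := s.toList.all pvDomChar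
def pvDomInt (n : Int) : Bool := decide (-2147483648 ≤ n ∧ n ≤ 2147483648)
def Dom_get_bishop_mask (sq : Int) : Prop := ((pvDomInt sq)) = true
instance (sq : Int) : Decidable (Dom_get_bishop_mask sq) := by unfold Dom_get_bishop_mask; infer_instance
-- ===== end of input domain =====

-- B replaces A's four per-square diagonal loops by a loop-free closed form: each ray's bits
-- are a geometric series ((1<<(s*n))-1)//((1<<s)-1) shifted to the ray's lowest exponent.

-- ===== PORT A =====
-- Python's 1 << k is (1 : Int) <<< k.toNat (k ≥ 0 on every input Pre_ admits; Python raises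
-- ValueError for k < 0, reached exactly when sq ≤ -9); | is PySem.Int.bor.
def get_bishop_mask (sq : Int) : Int :=
  let r := PySem.Int.floordiv sq 8
  let f := PySem.Int.mod sq 8
  let mask : Int := 0
  let mask := (PySem.List.pyRange 1 (min (7 - r) (7 - f)) 1).foldl
    (fun m i => PySem.Int.bor m ((1 : Int) <<< ((r + i) * 8 + f + i).toNat)) mask
  let mask := (PySem.List.pyRange 1 (min (7 - r) f) 1).foldl
    (fun m i => PySem.Int.bor m ((1 : Int) <<< ((r + i) * 8 + f - i).toNat)) mask
  let mask := (PySem.List.pyRange 1 (min r (7 - f)) 1).foldl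
    (fun m i => PySem.Int.bor m ((1 : Int) <<< ((r - i) * 8 + f + i).toNat)) mask
  let mask := (PySem.List.pyRange 1 (min r f) 1).foldl
    (fun m i => PySem.Int.bor m ((1 : Int) <<< ((r - i) * 8 + f - i).toNat)) mask
  mask

-- ===== PORT B =====
-- Source B's helper ray(n, step): the geometric bit pattern of one diagonal ray, shifted to its
-- lowest exponent (Python // is PySem.Int.floordiv; shifts need nonneg counts, given on Pre_).
def pvRayB (p n step : Int) : Int :=
  if n ≤ 0 then 0
  else
    let s : Int := |step|
    let low : Int := p + (if 0 < step then step else step * n)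
    (PySem.Int.floordiv ((1 : Int) <<< (s * n).toNat - 1) ((1 : Int) <<< s.toNat - 1)) <<< low.toNat

def get_bishop_mask_alt (sq : Int) : Int :=
  let r := PySem.Int.floordiv sq 8
  let f := PySem.Int.mod sq 8
  let p := 8 * r + f
  PySem.Int.bor (PySem.Int.bor (PySem.Int.bor
    (pvRayB p (min (7 - r) (7 - f) - 1) 9)
    (pvRayB p (min (7 - r) f - 1) 7))
    (pvRayB p (min r (7 - f) - 1) (-7)))
    (pvRayB p (min r f - 1) (-9))

-- ===== PRECONDITION & SPEC =====
-- Pre_ excludes exactly the inputs on which Python A raises ValueError (a negative shift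
-- count, reached for every sq ≤ -9); A returns normally on all sq ≥ -8.
def Pre_get_bishop_mask (sq : Int) : Prop := -8 ≤ sq
instance (sq : Int) : Decidable (Pre_get_bishop_mask sq) := by unfold Pre_get_bishop_mask; infer_instance
def pvWitness_get_bishop_mask : Int := 27

def Spec_get_bishop_mask (sq : Int) (out : Int) : Prop := out = get_bishop_mask_alt sq
instance (sq : Int) (out : Int) : Decidable (Spec_get_bishop_mask sq out) := by unfold Spec_get_bishop_mask; infer_instance

-- ===== CLAIM (what is proved, stated in full; the proofs are below) =====
def Claim_equal_get_bishop_mask : Prop := ∀ (sq : Int), Dom_get_bishop_mask sq → Pre_get_bishop_mask sq → Spec_get_bishop_mask sq (get_bishop_mask sq)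

-- ===== LEMMAS AND PROOFS =====

-- pvGeom s n = 1 + 2^s + … + 2^(s(n-1)), the repeating-bit factor of a ray of length n
def pvGeom (s : Nat) : Nat → Nat
  | 0 => 0
  | n + 1 => pvGeom s n + 2 ^ (s * n)

theorem pv_lor_two_pow : ∀ (i a : Nat), a < 2 ^ i → a ||| 2 ^ i = a + 2 ^ i := by
  intro i
  induction i with
  | zero => intro a h; interval_cases a; decide
  | succ i ih =>
    intro a h
    have hd : a / 2 < 2 ^ i := by rw [pow_succ] at h; omega
    conv_lhs => rw [← Nat.bit_decide_mod_two_eq_one_shiftRight_one a,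
      show (2 : Nat) ^ (i + 1) = Nat.bit false (2 ^ i) by simp [Nat.bit_false_apply]; ring]
    rw [Nat.lor_bit, Nat.shiftRight_one, ih _ hd]
    rw [Nat.bit_val, pow_succ]
    rcases Nat.mod_two_eq_zero_or_one a with h2 | h2 <;> simp [h2] <;> omega

theorem pv_shift_lor_one (y s : Nat) (_hs : 0 < s) : (y <<< s) ||| 1 = y <<< s + 1 := by
  obtain ⟨t, rfl⟩ : ∃ t, s = t + 1 := ⟨s - 1, by omega⟩
  have h : y <<< (t + 1) = Nat.bit false (y <<< t) := by
    simp [Nat.bit_false_apply, Nat.shiftLeft_eq, pow_succ]; ring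
  rw [h, show (1 : Nat) = Nat.bit true 0 from rfl, Nat.lor_bit]
  simp [Nat.bit_val]

theorem pvGeom_lt (s : Nat) (hs : 0 < s) : ∀ n, pvGeom s n < 2 ^ (s * n) := by
  intro n
  induction n with
  | zero => simp [pvGeom]
  | succ n ih =>
    have h2 : (2 : Nat) ^ (s * n) * 2 ≤ 2 ^ (s * n) * 2 ^ s :=
      Nat.mul_le_mul_left _ (by have := Nat.one_lt_two_pow_iff (n := s); omega)
    simp only [pvGeom, Nat.mul_succ, pow_add]
    omega

theorem pvGeom_mul (s : Nat) (_hs : 0 < s) : ∀ n, pvGeom s n * (2 ^ s - 1) + 1 = 2 ^ (s * n) := by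
  intro n
  induction n with
  | zero => simp [pvGeom]
  | succ n ih =>
    have h1 : (1 : Nat) ≤ 2 ^ s := Nat.one_le_two_pow
    have hA : (1 : Nat) ≤ 2 ^ (s * n) := Nat.one_le_two_pow
    have e2 : 2 ^ (s * n) * (2 ^ s - 1) = 2 ^ (s * n) * 2 ^ s - 2 ^ (s * n) := by
      rw [Nat.mul_sub, Nat.mul_one]
    have e4 : 2 ^ (s * n) ≤ 2 ^ (s * n) * 2 ^ s :=
      Nat.le_mul_of_pos_right _ (Nat.two_pow_pos s)
    simp only [pvGeom, Nat.add_mul, Nat.mul_succ, pow_add]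
    omega

theorem pvGeom_div (s : Nat) (hs : 0 < s) (n : Nat) :
    (2 ^ (s * n) - 1) / (2 ^ s - 1) = pvGeom s n := by
  have h := pvGeom_mul s hs n
  have h1 : (0 : Nat) < 2 ^ s - 1 := by
    have := Nat.one_lt_two_pow_iff (n := s); omega
  rw [show 2 ^ (s * n) - 1 = pvGeom s n * (2 ^ s - 1) by omega]
  exact Nat.mul_div_cancel _ h1

theorem pvGeom_succ_low (s : Nat) : ∀ n, pvGeom s (n + 1) = pvGeom s n <<< s + 1 := by
  intro n
  induction n with
  | zero => simp [pvGeom, Nat.shiftLeft_eq]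
  | succ n ih =>
    calc pvGeom s (n + 2) = pvGeom s (n + 1) + 2 ^ (s * (n + 1)) := rfl
    _ = (pvGeom s n <<< s + 1) + 2 ^ (s * (n + 1)) := by rw [ih]
    _ = (pvGeom s n + 2 ^ (s * n)) <<< s + 1 := by
        simp only [Nat.shiftLeft_eq, Nat.add_mul, Nat.mul_succ, pow_add]
        ring_nf
    _ = pvGeom s (n + 1) <<< s + 1 := rfl

theorem pv_one_shift (m : Nat) : (1 : Int) <<< m = ((2 ^ m : Nat) : Int) := by
  simp [Int.shiftLeft_eq]

theorem pv_cast_shift (x q : Nat) : ((x : Int)) <<< q = ((x <<< q : Nat) : Int) := by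
  simp [Int.shiftLeft_eq, Nat.shiftLeft_eq]

theorem pv_shift_sub_one (m : Nat) : (1 : Int) <<< m - 1 = ((2 ^ m - 1 : Nat) : Int) := by
  rw [pv_one_shift]
  have h : (1 : Nat) ≤ 2 ^ m := Nat.one_le_two_pow
  push_cast [h]
  ring

theorem pv_bor_nonneg (a b : Int) (ha : 0 ≤ a) (hb : 0 ≤ b) : 0 ≤ PySem.Int.bor a b := by
  rw [PySem.Int.bor_of_nonneg ha hb]; exact Int.natCast_nonneg _

theorem pv_bor_assoc (a b c : Int) (ha : 0 ≤ a) (hb : 0 ≤ b) (hc : 0 ≤ c) :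
    PySem.Int.bor (PySem.Int.bor a b) c = PySem.Int.bor a (PySem.Int.bor b c) := by
  rw [PySem.Int.bor_of_nonneg ha hb, PySem.Int.bor_of_nonneg hb hc,
    PySem.Int.bor_of_nonneg (Int.natCast_nonneg _) hc,
    PySem.Int.bor_of_nonneg ha (Int.natCast_nonneg _)]
  simp [Nat.lor_assoc]

theorem pv_bor_zero_left (a : Int) : PySem.Int.bor 0 a = a := by
  rw [PySem.Int.bor_comm]; simp

theorem pv_fold_bor_nonneg (g : Int → Int) (hg : ∀ i, 0 ≤ g i) :
    ∀ (l : List Int) (m0 : Int), 0 ≤ m0 →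
      0 ≤ l.foldl (fun m i => PySem.Int.bor m (g i)) m0 := by
  intro l
  induction l with
  | nil => intro m0 hm; simpa using hm
  | cons a l ih =>
    intro m0 hm
    exact ih _ (pv_bor_nonneg _ _ hm (hg a))

theorem pv_foldl_bor (g : Int → Int) (hg : ∀ i, 0 ≤ g i) :
    ∀ (l : List Int) (m0 : Int), 0 ≤ m0 →
      l.foldl (fun m i => PySem.Int.bor m (g i)) m0
        = PySem.Int.bor m0 (l.foldl (fun m i => PySem.Int.bor m (g i)) 0) := by
  intro l
  induction l with
  | nil => intro m0 hm; simp
  | cons a l ih =>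
    intro m0 hm
    simp only [List.foldl_cons]
    rw [ih _ (pv_bor_nonneg _ _ hm (hg a)), pv_bor_zero_left,
      ih _ (hg a), pv_bor_assoc _ _ _ hm (hg a)
        (pv_fold_bor_nonneg g hg l 0 le_rfl)]

-- congruence for foldl with pointwise-equal functions and equal starts
theorem pv_foldl_congr {α β : Type} (l : List β) (f g : α → β → α) (a b : α)
    (hf : ∀ x y, f x y = g x y) (hab : a = b) : l.foldl f a = l.foldl g b := by
  subst hab
  rw [funext fun x => funext fun y => hf x y]

theorem pv_bor_shift_congr (x e1 e2 : Int) (h : e1 = e2) :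
    PySem.Int.bor x ((1 : Int) <<< e1.toNat) = PySem.Int.bor x ((1 : Int) <<< e2.toNat) := by
  rw [h]

-- A's upward ray loop computes the geometric closed form
theorem pv_ray_up (s : Nat) (hs : 0 < s) :
    ∀ (n : Nat) (p : Int), 0 ≤ p + s →
      (PySem.List.pyRange 1 (1 + (n : Int)) 1).foldl
          (fun m i => PySem.Int.bor m ((1 : Int) <<< (p + s * i).toNat)) 0
        = ((pvGeom s n <<< (p + s).toNat : Nat) : Int) := by
  intro n
  induction n with
  | zero =>
    intro p hp
    rw [show (1 + ((0 : Nat) : Int)) = 1 by norm_num, PySem.List.pyRange_one_eq_nil le_rfl]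
    simp [pvGeom]
  | succ n ih =>
    intro p hp
    have hk : 0 ≤ (s : Int) * n := by positivity
    rw [show (1 + ((n + 1 : Nat) : Int)) = (1 + (n : Int)) + 1 by push_cast; ring,
      PySem.List.pyRange_one_succ_right (by omega), List.foldl_append]
    rw [ih p hp]
    simp only [List.foldl_cons, List.foldl_nil]
    have he : (p + s * (1 + (n : Int))).toNat = (p + s).toNat + s * n := by
      have h1 : (p + (s : Int) * (1 + (n : Int))) = (p + s) + s * n := by ring
      omega
    rw [he, pv_one_shift, PySem.Int.bor_natCast]
    congr 1
    rw [show (2 : Nat) ^ ((p + s).toNat + s * n) = (2 ^ (s * n)) <<< (p + s).toNat by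
        simp [Nat.shiftLeft_eq, pow_add]; ring,
      ← Nat.shiftLeft_or_distrib, pv_lor_two_pow _ _ (pvGeom_lt s hs n)]
    rfl

-- A's downward ray loop computes the geometric closed form
theorem pv_ray_down (s : Nat) (hs : 0 < s) :
    ∀ (n : Nat) (p : Int), 0 ≤ p - s * n →
      (PySem.List.pyRange 1 (1 + (n : Int)) 1).foldl
          (fun m i => PySem.Int.bor m ((1 : Int) <<< (p - s * i).toNat)) 0
        = ((pvGeom s n <<< (p - s * n).toNat : Nat) : Int) := by
  intro n
  induction n with
  | zero =>
    intro p hp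
    rw [show (1 + ((0 : Nat) : Int)) = 1 by norm_num, PySem.List.pyRange_one_eq_nil le_rfl]
    simp [pvGeom]
  | succ n ih =>
    intro p hp
    have hc : ((n + 1 : Nat) : Int) = 1 + (n : Int) := by push_cast; ring
    rw [hc] at hp ⊢
    have hk : 0 ≤ (s : Int) * n := by positivity
    have h1 : (s : Int) * (1 + (n : Int)) = s + s * n := by ring
    have hp' : 0 ≤ p - s * n := by omega
    rw [show (1 : Int) + (1 + (n : Int)) = (1 + (n : Int)) + 1 by ring,
      PySem.List.pyRange_one_succ_right (by omega), List.foldl_append]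
    rw [ih p hp']
    simp only [List.foldl_cons, List.foldl_nil]
    set q := (p - (s : Int) * (1 + (n : Int))).toNat with hq
    rw [show (p - (s : Int) * (n : Int)).toNat = q + s by omega]
    rw [pv_one_shift, PySem.Int.bor_natCast]
    congr 1
    rw [show (2:Nat) ^ q = 1 <<< q by simp [Nat.shiftLeft_eq],
      show q + s = s + q by omega, Nat.shiftLeft_add,
      ← Nat.shiftLeft_or_distrib, pv_shift_lor_one _ _ hs, ← pvGeom_succ_low]

-- one upward ray: A's loop equals B's ray term
theorem pv_ray_up_full (s : Nat) (hs : 0 < s) (p b : Int) (hp : b ≤ 1 ∨ 0 ≤ p + s) :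
    (PySem.List.pyRange 1 b 1).foldl
        (fun m i => PySem.Int.bor m ((1 : Int) <<< (p + s * i).toNat)) 0
      = pvRayB p (b - 1) (s : Int) := by
  by_cases hb : b ≤ 1
  · rw [PySem.List.pyRange_one_eq_nil hb]
    simp only [List.foldl_nil, pvRayB, if_pos (show b - 1 ≤ 0 by omega)]
  · have hp' : 0 ≤ p + s := hp.resolve_left hb
    have hn : b = 1 + ((b - 1).toNat : Int) := by omega
    rw [hn, pv_ray_up s hs _ p hp']
    set n := (b - 1).toNat with hdef
    rw [pvRayB, if_neg (by omega)]
    have habs : |((s : Nat) : Int)| = (s : Int) := abs_of_nonneg (by positivity)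
    simp only [habs, if_pos (show (0 : Int) < s by exact_mod_cast hs)]
    rw [show ((s : Int) * (1 + (n : Int) - 1)).toNat = s * n by
        have : ((s : Int) * (1 + (n : Int) - 1)) = ((s * n : Nat) : Int) := by push_cast; ring
        omega,
      show ((s : Int)).toNat = s by omega,
      pv_shift_sub_one, pv_shift_sub_one, PySem.Int.floordiv_natCast,
      pvGeom_div s hs n, pv_cast_shift]

-- one downward ray: A's loop equals B's ray term
theorem pv_ray_down_full (s : Nat) (hs : 0 < s) (p b : Int)
    (hlow : b ≤ 1 ∨ 0 ≤ p - s * (b - 1)) :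
    (PySem.List.pyRange 1 b 1).foldl
        (fun m i => PySem.Int.bor m ((1 : Int) <<< (p - s * i).toNat)) 0
      = pvRayB p (b - 1) (-(s : Int)) := by
  by_cases hb : b ≤ 1
  · rw [PySem.List.pyRange_one_eq_nil hb]
    simp only [List.foldl_nil, pvRayB, if_pos (show b - 1 ≤ 0 by omega)]
  · have hp : 0 ≤ p - s * (b - 1) := hlow.resolve_left hb
    have hn : b = 1 + ((b - 1).toNat : Int) := by omega
    set n := (b - 1).toNat with hdef
    have hbn : b - 1 = (n : Int) := by omega
    rw [hn, pv_ray_down s hs _ p (by rw [← hbn]; exact hp)]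
    rw [pvRayB, if_neg (by omega)]
    have habs : |(-(s : Int))| = (s : Int) := by
      rw [abs_neg]; exact abs_of_nonneg (by positivity)
    simp only [habs, if_neg (show ¬ (0 : Int) < -(s : Int) by omega)]
    rw [show ((s : Int) * (1 + (n : Int) - 1)).toNat = s * n by
        have : ((s : Int) * (1 + (n : Int) - 1)) = ((s * n : Nat) : Int) := by push_cast; ring
        omega,
      show ((s : Int)).toNat = s by omega,
      pv_shift_sub_one, pv_shift_sub_one, PySem.Int.floordiv_natCast,
      pvGeom_div s hs n, pv_cast_shift,
      show p + -(s : Int) * (1 + (n : Int) - 1) = p - s * n by ring]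

-- shifts of 1 are nonnegative (the fold-factoring lemmas need it)
theorem pv_shift_nonneg (e : Int) : 0 ≤ (1 : Int) <<< e.toNat := by
  rw [pv_one_shift]; exact Int.natCast_nonneg _

-- ===== VERDICT (by name: the statement is the Claim_ definition above) =====
theorem get_bishop_mask_spec : Claim_equal_get_bishop_mask := by
  intro sq _ hpre
  unfold Spec_get_bishop_mask get_bishop_mask get_bishop_mask_alt
  set r := PySem.Int.floordiv sq 8 with hrdef
  set f := PySem.Int.mod sq 8 with hfdef
  have hfb : 0 ≤ f ∧ f < 8 := by
    rw [hfdef, PySem.Int.mod_eq_emod_of_pos (by norm_num)]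
    exact ⟨Int.emod_nonneg sq (by norm_num), Int.emod_lt_of_pos sq (by norm_num)⟩
  have hrb : -1 ≤ r := by
    rw [hrdef, PySem.Int.le_floordiv_iff_mul_le (by norm_num)]
    unfold Pre_get_bishop_mask at hpre
    omega
  dsimp only
  -- canonicalise A's four exponent functions to p ± s·i with p = 8r + f
  rw [pv_foldl_congr _ (fun m i => PySem.Int.bor m ((1 : Int) <<< ((r + i) * 8 + f + i).toNat))
      (fun m i => PySem.Int.bor m ((1 : Int) <<< ((8 * r + f) + 9 * i).toNat)) _ _
      (fun x y => pv_bor_shift_congr _ _ _ (by ring)) rfl,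
    pv_foldl_congr _ (fun m i => PySem.Int.bor m ((1 : Int) <<< ((r + i) * 8 + f - i).toNat))
      (fun m i => PySem.Int.bor m ((1 : Int) <<< ((8 * r + f) + 7 * i).toNat)) _ _
      (fun x y => pv_bor_shift_congr _ _ _ (by ring)) rfl,
    pv_foldl_congr _ (fun m i => PySem.Int.bor m ((1 : Int) <<< ((r - i) * 8 + f + i).toNat))
      (fun m i => PySem.Int.bor m ((1 : Int) <<< ((8 * r + f) - 7 * i).toNat)) _ _
      (fun x y => pv_bor_shift_congr _ _ _ (by ring)) rfl,
    pv_foldl_congr _ (fun m i => PySem.Int.bor m ((1 : Int) <<< ((r - i) * 8 + f - i).toNat))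
      (fun m i => PySem.Int.bor m ((1 : Int) <<< ((8 * r + f) - 9 * i).toNat)) _ _
      (fun x y => pv_bor_shift_congr _ _ _ (by ring)) rfl]
  -- factor each fold's start out as a bor
  rw [pv_foldl_bor _ (fun i => pv_shift_nonneg _) _ _
      (pv_fold_bor_nonneg _ (fun i => pv_shift_nonneg _) _ _
        (pv_fold_bor_nonneg _ (fun i => pv_shift_nonneg _) _ _
          (pv_fold_bor_nonneg _ (fun i => pv_shift_nonneg _) _ _ le_rfl))),
    pv_foldl_bor _ (fun i => pv_shift_nonneg _) _ _
      (pv_fold_bor_nonneg _ (fun i => pv_shift_nonneg _) _ _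
        (pv_fold_bor_nonneg _ (fun i => pv_shift_nonneg _) _ _ le_rfl)),
    pv_foldl_bor _ (fun i => pv_shift_nonneg _) _ _
      (pv_fold_bor_nonneg _ (fun i => pv_shift_nonneg _) _ _ le_rfl)]
  -- rewrite each ray to B's closed form
  have h1 := pv_ray_up_full 9 (by norm_num) (8 * r + f) (min (7 - r) (7 - f)) (by
    right; push_cast; omega)
  have h2 := pv_ray_up_full 7 (by norm_num) (8 * r + f) (min (7 - r) f) (by
    by_cases h : min (7 - r) f ≤ 1
    · exact Or.inl h
    · right; push_cast; omega)
  have h3 := pv_ray_down_full 7 (by norm_num) (8 * r + f) (min r (7 - f)) (by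
    by_cases h : min r (7 - f) ≤ 1
    · exact Or.inl h
    · right; push_cast; omega)
  have h4 := pv_ray_down_full 9 (by norm_num) (8 * r + f) (min r f) (by
    by_cases h : min r f ≤ 1
    · exact Or.inl h
    · right; push_cast; omega)
  push_cast at h1 h2 h3 h4
  rw [h1, h2, h3, h4]
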